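-- pv_equiv track=rewrite | github.com/fujimotos/kindna | kindna.py | make_index
-- ===== SOURCE A (Python) =====
-- import itertools
--
-- def make_index(word, max_dist):
--     """Return the set of index keys of a word.
--
--     >>> make_index('aiu', 1)
--     {'aiu', 'iu', 'au', 'ai'}
--     """
--     res = set()
--     length = len(word)
--     for dist in range(min(max_dist, length) + 1):
--         variants = itertools.combinations(word, length - dist)
--         for variant in variants:
--             res.add(''.join(variant))
--     return res
-- ===== SOURCE B (Python) =====
-- def dels(s, d):
--     """All strings obtained from s by deleting exactly d characters,
--     in the order induced by keeping/dropping the first character."""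
--     if d == 0:
--         return [s]
--     if not s:
--         return []
--     rest = s[1:]
--     return [s[0] + t for t in dels(rest, d)] + dels(rest, d - 1)
--
--
-- def make_index(word, max_dist):
--     res = set()
--     for d in range(min(max_dist, len(word)) + 1):
--         for s in dels(word, d):
--             res.add(s)
--     return res
-- ===== Notes on version B (the rewrite author's own statement) =====
-- stated objective: alternative
-- what changed: Replaces itertools.combinations over characters plus ''.join with a direct recursive generator dels(s, d) that builds the strings obtainable by deleting exactly d characters, recursing on keep/drop of the first character.
import Mathlib
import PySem

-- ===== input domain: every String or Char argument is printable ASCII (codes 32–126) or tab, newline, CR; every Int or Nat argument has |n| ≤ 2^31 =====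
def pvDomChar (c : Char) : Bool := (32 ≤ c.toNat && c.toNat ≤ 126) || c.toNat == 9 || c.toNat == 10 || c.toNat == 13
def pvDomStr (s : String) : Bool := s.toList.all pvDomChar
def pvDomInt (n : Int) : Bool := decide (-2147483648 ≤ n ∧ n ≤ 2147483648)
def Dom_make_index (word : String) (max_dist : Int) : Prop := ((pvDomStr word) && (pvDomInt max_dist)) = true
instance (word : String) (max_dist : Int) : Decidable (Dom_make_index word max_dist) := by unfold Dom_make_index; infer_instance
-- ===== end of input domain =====

-- B replaces itertools.combinations + ''.join with a recursive generator of the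
-- d-deletion strings of the word (same set value, an alternative decomposition).

-- ===== PORT A =====
-- port of A: for dist in range(min(max_dist, length)+1): res.add(''.join(v)) for v in combinations(word, length-dist)
-- ''.join over a tuple of single characters is exactly String.ofList of that char list.
def make_index (word : String) (max_dist : Int) : List String :=
  let cs := word.toList
  let length : Int := (cs.length : Int)
  (PySem.List.pyRange 0 (min max_dist length + 1) 1).foldl
    (fun res dist =>
      ((PySem.List.combinations cs (length - dist).toNat).map
        (fun variant => String.ofList variant)).foldl PySem.Set.add res)
    []

-- ===== PORT B =====
-- port of Source B's dels, on the character list of the string (s[0], s[1:], s[0]+t are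
-- exact head/tail/cons on the char list).
def delsC : List Char → Nat → List (List Char)
  | s, 0 => [s]
  | [], _ + 1 => []
  | c :: rest, d + 1 =>
      ((delsC rest (d + 1)).map (fun t => c :: t)) ++ delsC rest d

def make_index_alt (word : String) (max_dist : Int) : List String :=
  let cs := word.toList
  (PySem.List.pyRange 0 (min max_dist (cs.length : Int) + 1) 1).foldl
    (fun res d =>
      ((delsC cs d.toNat).map (fun s => String.ofList s)).foldl PySem.Set.add res)
    []

-- ===== PRECONDITION & SPEC =====
def Spec_make_index (word : String) (max_dist : Int) (out : List String) : Prop := out = make_index_alt word max_dist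
instance (word : String) (max_dist : Int) (out : List String) : Decidable (Spec_make_index word max_dist out) := by unfold Spec_make_index; infer_instance

-- ===== CLAIM (what is proved, stated in full; the proofs are below) =====
def Claim_equal_make_index : Prop := ∀ (word : String) (max_dist : Int), Dom_make_index word max_dist → Spec_make_index word max_dist (make_index word max_dist)

-- ===== LEMMAS AND PROOFS =====

theorem delsC_eq_nil_of_lt (s : List Char) (d : Nat) (h : s.length < d) :
    delsC s d = [] := by
  induction s generalizing d with
  | nil =>
      cases d with
      | zero => omega
      | succ d => rfl
  | cons c rest ih =>
      cases d with
      | zero => omega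
      | succ d =>
          have hlt : rest.length < d := by simpa using h
          simp [delsC, ih (d + 1) (by omega), ih d hlt]

theorem delsC_eq_combinations (s : List Char) (d : Nat) (h : d ≤ s.length) :
    delsC s d = PySem.List.combinations s (s.length - d) := by
  induction s generalizing d with
  | nil =>
      have hd0 : d = 0 := by simpa using h
      subst hd0
      simp [delsC, PySem.List.combinations_zero]
  | cons c rest ih =>
      cases d with
      | zero =>
          simpa [delsC] using (PySem.List.combinations_length_self (c :: rest)).symm
      | succ d =>
          have hd : d ≤ rest.length := by simpa using h
          simp only [delsC]
          rcases Nat.lt_or_ge d rest.length with h' | h'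
          · have hk : (c :: rest).length - (d + 1) = (rest.length - (d + 1)) + 1 := by
              simp; omega
            rw [hk, PySem.List.combinations_cons_succ,
                ih (d + 1) (by omega), ih d hd]
            have : rest.length - (d + 1) + 1 = rest.length - d := by omega
            rw [this]
          · have hde : d = rest.length := by omega
            subst hde
            rw [delsC_eq_nil_of_lt rest (rest.length + 1) (by omega),
                ih rest.length (le_refl _)]
            simp [PySem.List.combinations_zero]

-- ===== VERDICT (by name: the statement is the Claim_ definition above) =====
theorem make_index_spec : Claim_equal_make_index := by
  intro word max_dist _
  unfold Spec_make_index make_index make_index_alt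
  apply PySem.List.foldl_congr_mem
  intro res dist hmem
  have hb := (PySem.List.mem_pyRange_one).1 hmem
  have h0 : 0 ≤ dist := hb.1
  have hle : dist ≤ min max_dist (word.toList.length : Int) := by omega
  have hdn : dist.toNat ≤ word.toList.length := by omega
  have harg : ((word.toList.length : Int) - dist).toNat = word.toList.length - dist.toNat := by
    omega
  rw [harg, delsC_eq_combinations word.toList dist.toNat hdn]
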